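-- pv_equiv track=rewrite | github.com/jeegark/Life-Sciences-Plan-Tracker | scripts/build_tracker.py | action_status
-- ===== SOURCE A (Python) =====
-- def action_status(milestones: list[dict[str, object]]) -> str:
--     statuses = [milestone["status"] for milestone in milestones]
--     if all(status == "Completed" for status in statuses):
--         return "Completed"
--     if any(status == "Delayed" for status in statuses):
--         if any(status in {"Late but in progress", "Completed"} for status in statuses):
--             return "Late but in progress"
--         return "Delayed"
--     if any(status == "Late but in progress" for status in statuses):
--         return "Late but in progress"
--     if any(status == "At risk" for status in statuses):
--         return "At risk"
--     return "On track"
-- ===== SOURCE B (Python) =====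
-- def action_status(milestones: list[dict[str, object]]) -> str:
--     all_completed = True
--     has_delayed = has_lbip = has_completed = has_at_risk = False
--     for milestone in milestones:
--         status = milestone["status"]
--         all_completed = all_completed and status == "Completed"
--         has_delayed = has_delayed or status == "Delayed"
--         has_lbip = has_lbip or status == "Late but in progress"
--         has_completed = has_completed or status == "Completed"
--         has_at_risk = has_at_risk or status == "At risk"
--     if all_completed:
--         return "Completed"
--     if has_delayed:
--         return "Late but in progress" if (has_lbip or has_completed) else "Delayed"
--     if has_lbip:
--         return "Late but in progress"
--     if has_at_risk:
--         return "At risk"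
--     return "On track"
-- ===== Notes on version B (the rewrite author's own statement) =====
-- stated objective: alternative
-- what changed: Replaces the materialised status list plus up to five separate all()/any() scans with a single pass over milestones maintaining five boolean flags, deciding the label once at the end.
import Mathlib
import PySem

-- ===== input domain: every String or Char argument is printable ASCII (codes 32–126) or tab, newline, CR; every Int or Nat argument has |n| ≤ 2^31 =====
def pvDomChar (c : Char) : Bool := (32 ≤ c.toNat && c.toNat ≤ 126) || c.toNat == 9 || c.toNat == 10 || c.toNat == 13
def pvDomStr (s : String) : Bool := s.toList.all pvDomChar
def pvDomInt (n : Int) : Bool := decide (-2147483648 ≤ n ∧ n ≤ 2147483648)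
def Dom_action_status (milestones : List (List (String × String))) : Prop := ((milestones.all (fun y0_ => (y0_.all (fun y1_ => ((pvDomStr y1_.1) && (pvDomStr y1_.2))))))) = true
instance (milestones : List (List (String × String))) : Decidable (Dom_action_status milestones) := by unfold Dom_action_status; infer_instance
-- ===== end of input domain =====

-- B differs from A only in shape (one pass with flags instead of repeated scans); equivalence is over the return value.

-- ===== PORT A =====
-- milestone["status"] : first-match lookup; none = KeyError (excluded by Pre_)
def getStatusA (m : List (String × String)) : Option String :=
  (PySem.Dict.mk m).get? "status"

def action_status (milestones : List (List (String × String))) : String :=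
  let statuses := milestones.map getStatusA
  if statuses.all (fun s => s == some "Completed") then "Completed"
  else if statuses.any (fun s => s == some "Delayed") then
    if statuses.any (fun s => s == some "Late but in progress" || s == some "Completed") then
      "Late but in progress"
    else "Delayed"
  else if statuses.any (fun s => s == some "Late but in progress") then "Late but in progress"
  else if statuses.any (fun s => s == some "At risk") then "At risk"
  else "On track"

-- ===== PORT B =====
-- one pass maintaining (all_completed, has_delayed, has_lbip, has_completed, has_at_risk)
def altLoop (ms : List (List (String × String))) (ac hd hl hc hr : Bool) :
    Bool × Bool × Bool × Bool × Bool :=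
  match ms with
  | [] => (ac, hd, hl, hc, hr)
  | m :: rest =>
    let s := (PySem.Dict.mk m).get? "status"
    altLoop rest (ac && s == some "Completed") (hd || s == some "Delayed")
      (hl || s == some "Late but in progress") (hc || s == some "Completed")
      (hr || s == some "At risk")

def action_status_alt (milestones : List (List (String × String))) : String :=
  match altLoop milestones true false false false false with
  | (ac, hd, hl, hc, hr) =>
    if ac then "Completed"
    else if hd then (if hl || hc then "Late but in progress" else "Delayed")
    else if hl then "Late but in progress"
    else if hr then "At risk"
    else "On track"

-- ===== PRECONDITION & SPEC =====
-- Pre_ excludes milestones without a "status" key, on which A (and B) raise KeyError.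
def Pre_action_status (milestones : List (List (String × String))) : Prop :=
  milestones.all (fun m => m.any (fun p => p.1 == "status")) = true
instance (milestones : List (List (String × String))) : Decidable (Pre_action_status milestones) := by
  unfold Pre_action_status; infer_instance

def pvWitness_action_status : (List (List (String × String))) :=
  [[("status", "Completed")], [("status", "At risk")]]

def Spec_action_status (milestones : List (List (String × String))) (out : String) : Prop := out = action_status_alt milestones
instance (milestones : List (List (String × String))) (out : String) : Decidable (Spec_action_status milestones out) := by unfold Spec_action_status; infer_instance

-- ===== CLAIM (what is proved, stated in full; the proofs are below) =====
def Claim_equal_action_status : Prop := ∀ (milestones : List (List (String × String))), Dom_action_status milestones → Pre_action_status milestones → Spec_action_status milestones (action_status milestones)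

-- ===== LEMMAS AND PROOFS =====
theorem any_or_split (l : List (Option String)) (p q : Option String → Bool) :
    (l.any fun s => p s || q s) = (l.any p || l.any q) := by
  induction l with
  | nil => simp
  | cons a t ih => cases p a <;> cases q a <;> simp [List.any_cons, ih, Bool.or_assoc, Bool.or_left_comm]

theorem altLoop_eq (ms : List (List (String × String))) (ac hd hl hc hr : Bool) :
    altLoop ms ac hd hl hc hr =
      (ac && (ms.map getStatusA).all (fun s => s == some "Completed"),
       hd || (ms.map getStatusA).any (fun s => s == some "Delayed"),
       hl || (ms.map getStatusA).any (fun s => s == some "Late but in progress"),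
       hc || (ms.map getStatusA).any (fun s => s == some "Completed"),
       hr || (ms.map getStatusA).any (fun s => s == some "At risk")) := by
  induction ms generalizing ac hd hl hc hr with
  | nil => simp [altLoop]
  | cons m rest ih =>
    simp only [altLoop, ih, List.map_cons, List.all_cons, List.any_cons, getStatusA,
      Bool.and_assoc, Bool.or_assoc]

-- ===== VERDICT (by name: the statement is the Claim_ definition above) =====
theorem action_status_spec : Claim_equal_action_status := by
  intro ms _ _
  unfold Spec_action_status action_status action_status_alt
  rw [altLoop_eq]
  simp only [Bool.true_and, Bool.false_or,
    any_or_split (ms.map getStatusA) (fun s => s == some "Late but in progress")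
      (fun s => s == some "Completed")]
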